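-- pv_equiv track=rewrite | github.com/Hagaio21/ImgiNav | data_preparation/utils/layout_analysis.py | categorize_room_by_contents
-- ===== SOURCE A (Python) =====
-- from typing import Dict, Set, Tuple, Optional, Union
--
-- def categorize_room_by_contents(categories_present: Set[str]) -> str:
--     """
--     Categorize a room based on the object categories present.
--
--     Args:
--         categories_present: Set of category names found in the layout
--
--     Returns:
--         String category name for the room
--     """
--     # Define priority order for categorization (most specific first)
--     category_priority = [
--         ("Bed", "bedroom"),
--         ("Table", "dining"),
--         ("Chair", "seating"),
--         ("Sofa", "living"),
--         ("Cabinet", "storage"),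
--         ("Kitchen", "kitchen"),
--         ("Bath", "bathroom"),
--         ("Desk", "office"),
--     ]
--
--     # Check for specific categories
--     for cat_name, room_type in category_priority:
--         if any(cat_name.lower() in cat.lower() for cat in categories_present):
--             return room_type
--
--     # If no specific category found, create a combined category
--     if len(categories_present) > 0:
--         # Sort for consistency
--         sorted_cats = sorted(categories_present)
--         return "_".join(sorted_cats[:3])  # Use first 3 categories
--     else:
--         return "empty_or_unknown"
-- ===== SOURCE B (Python) =====
-- def categorize_room_by_contents(categories_present):
--     """Classify a room from the set of present object categories.
--
--     Instead of scanning the priority list and re-scanning all categories for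
--     each keyword, scan each category once (lowercased once) and keep the
--     smallest priority index whose keyword occurs in it.
--     """
--     category_priority = [
--         ("Bed", "bedroom"),
--         ("Table", "dining"),
--         ("Chair", "seating"),
--         ("Sofa", "living"),
--         ("Cabinet", "storage"),
--         ("Kitchen", "kitchen"),
--         ("Bath", "bathroom"),
--         ("Desk", "office"),
--     ]
--     best = None  # (priority index, room_type)
--     for cat in categories_present:
--         cat_l = cat.lower()
--         for k, (kw, room) in enumerate(category_priority):
--             if kw.lower() in cat_l:
--                 if best is None or k < best[0]:
--                     best = (k, room)
--                 break
--     if best is not None: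
--         return best[1]
--     if len(categories_present) > 0:
--         return "_".join(sorted(categories_present)[:3])
--     return "empty_or_unknown"
-- ===== Notes on version B (the rewrite author's own statement) =====
-- stated objective: alternative
-- what changed: B inverts the loop nesting: one pass over the categories (each lowercased once), keeping the minimal priority index whose keyword is a substring and breaking at the first keyword hit per category, instead of A's pass over the priority list with an inner re-scan of all categories per keyword.
import Mathlib
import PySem

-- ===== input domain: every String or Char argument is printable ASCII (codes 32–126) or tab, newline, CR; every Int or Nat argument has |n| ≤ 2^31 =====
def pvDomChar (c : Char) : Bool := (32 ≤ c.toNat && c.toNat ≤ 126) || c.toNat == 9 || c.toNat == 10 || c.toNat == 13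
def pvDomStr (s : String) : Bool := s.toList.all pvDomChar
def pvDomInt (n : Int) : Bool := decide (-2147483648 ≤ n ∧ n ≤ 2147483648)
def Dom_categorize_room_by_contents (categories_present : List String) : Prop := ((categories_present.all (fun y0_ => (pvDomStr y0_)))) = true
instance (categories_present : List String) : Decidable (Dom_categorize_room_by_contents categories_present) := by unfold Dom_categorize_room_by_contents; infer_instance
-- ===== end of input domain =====

-- B inverts the loop nesting (one pass over the categories keeping the minimal priority
-- index, instead of a pass over the priority list re-scanning all categories per keyword);
-- objective: alternative decomposition, same result proved equal.

-- the shared constant table of (keyword, room_type) pairs (pure data, used by both ports)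
def roomPriority : List (String × String) :=
  [("Bed", "bedroom"), ("Table", "dining"), ("Chair", "seating"), ("Sofa", "living"),
   ("Cabinet", "storage"), ("Kitchen", "kitchen"), ("Bath", "bathroom"), ("Desk", "office")]

-- ===== PORT A =====
-- A's loop over the priority list: return the first room whose keyword occurs (lowercased)
-- in some category (lowercased); `none` = the loop fell through.
def aLoop (cs : List String) : List (String × String) → Option String
  | [] => none
  | (k, r) :: rest =>
      if cs.any (fun c => PySem.Str.isIn (PySem.Str.lower k) (PySem.Str.lower c)) then some r
      else aLoop cs rest

def categorize_room_by_contents (categories_present : List String) : String :=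
  match aLoop categories_present roomPriority with
  | some r => r
  | none =>
      if categories_present.length > 0 then
        PySem.Str.join "_"
          (PySem.List.slice (PySem.List.sorted categories_present (fun x => x) false) none (some 3))
      else "empty_or_unknown"

-- ===== PORT B =====
-- B's inner loop: first (index, room) of the priority list whose lowercased keyword is a
-- substring of the already-lowercased category (the Python `break` = stop at first hit).
def bFirstKw (cl : String) : List (String × String) → Nat → Option (Nat × String)
  | [], _ => none
  | (kw, room) :: rest, k =>
      if PySem.Str.isIn (PySem.Str.lower kw) cl then some (k, room)
      else bFirstKw cl rest (k + 1)

-- `best is None or k < best[0]` update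
def bMin : Option (Nat × String) → Option (Nat × String) → Option (Nat × String)
  | none, b => b
  | some a, none => some a
  | some a, some b => if b.1 < a.1 then some b else some a

def categorize_room_by_contents_alt (categories_present : List String) : String :=
  match categories_present.foldl
      (fun acc c => bMin acc (bFirstKw (PySem.Str.lower c) roomPriority 0)) none with
  | some (_, r) => r
  | none =>
      if categories_present.length > 0 then
        PySem.Str.join "_"
          (PySem.List.slice (PySem.List.sorted categories_present (fun x => x) false) none (some 3))
      else "empty_or_unknown"

-- ===== PRECONDITION & SPEC =====
def Spec_categorize_room_by_contents (categories_present : List String) (out : String) : Prop := out = categorize_room_by_contents_alt categories_present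
instance (categories_present : List String) (out : String) : Decidable (Spec_categorize_room_by_contents categories_present out) := by unfold Spec_categorize_room_by_contents; infer_instance

-- ===== CLAIM (what is proved, stated in full; the proofs are below) =====
def Claim_equal_categorize_room_by_contents : Prop := ∀ (categories_present : List String), Dom_categorize_room_by_contents categories_present → Spec_categorize_room_by_contents categories_present (categorize_room_by_contents categories_present)

-- ===== LEMMAS AND PROOFS =====

-- generic first-hit scan with a running index, recording (index, room) of the first pair
-- satisfying q; both ports' loops are instances of it
def fstA (q : (String × String) → Bool) : List (String × String) → Nat → Option (Nat × String)
  | [], _ => none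
  | p :: rest, n => if q p then some (n, p.2) else fstA q rest (n + 1)

-- the keyword test shared by both programs
def kwMatch (c : String) (p : String × String) : Bool :=
  PySem.Str.isIn (PySem.Str.lower p.1) (PySem.Str.lower c)

lemma fstA_congr (q₁ q₂ : (String × String) → Bool) (h : ∀ p, q₁ p = q₂ p) :
    ∀ (L : List (String × String)) (n : Nat), fstA q₁ L n = fstA q₂ L n := by
  intro L
  induction L with
  | nil => intro n; rfl
  | cons p rest ih => intro n; simp [fstA, h p, ih]

lemma fstA_false : ∀ (L : List (String × String)) (n : Nat), fstA (fun _ => false) L n = none := by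
  intro L
  induction L with
  | nil => intro n; rfl
  | cons p rest ih => intro n; simp [fstA, ih]

lemma fstA_ge (q : (String × String) → Bool) :
    ∀ (L : List (String × String)) (n k : Nat) (r : String),
      fstA q L n = some (k, r) → n ≤ k := by
  intro L
  induction L with
  | nil => intro n k r h; simp [fstA] at h
  | cons p rest ih =>
      intro n k r h
      by_cases hq : q p
      · simp [fstA, hq] at h; omega
      · simp [fstA, hq] at h; have := ih (n + 1) k r h; omega

lemma aLoop_eq_fstA (cs : List String) :
    ∀ (L : List (String × String)) (n : Nat),
      aLoop cs L = (fstA (fun p => cs.any (fun c => kwMatch c p)) L n).map Prod.snd := by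
  intro L
  induction L with
  | nil => intro n; rfl
  | cons p rest ih =>
      intro n
      obtain ⟨k, r⟩ := p
      simp only [aLoop, fstA, kwMatch]
      cases h : cs.any (fun c => PySem.Str.isIn (PySem.Str.lower k) (PySem.Str.lower c)) with
      | true => simp
      | false => simp [kwMatch, ih (n + 1)]

lemma bFirstKw_eq_fstA (c : String) :
    ∀ (L : List (String × String)) (n : Nat),
      bFirstKw (PySem.Str.lower c) L n = fstA (kwMatch c) L n := by
  intro L
  induction L with
  | nil => intro n; rfl
  | cons p rest ih =>
      intro n
      obtain ⟨kw, room⟩ := p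
      simp [bFirstKw, fstA, kwMatch, ih (n + 1)]

lemma fstA_or (q₁ q₂ : (String × String) → Bool) :
    ∀ (L : List (String × String)) (n : Nat),
      fstA (fun p => q₁ p || q₂ p) L n = bMin (fstA q₁ L n) (fstA q₂ L n) := by
  intro L
  induction L with
  | nil => intro n; rfl
  | cons p rest ih =>
      intro n
      by_cases h1 : q₁ p = true <;> by_cases h2 : q₂ p = true
      · simp [fstA, h1, h2, bMin]
      · simp only [fstA, h1, h2, Bool.true_or, if_true]
        rcases hr : fstA q₂ rest (n + 1) with _ | ⟨k, r⟩
        · simp [bMin]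
        · have hk := fstA_ge q₂ rest (n + 1) k r hr
          simp [bMin, show ¬ k < n from by omega]
      · have h1' : q₁ p = false := by simp [h1]
        simp only [fstA, h1', h2, Bool.false_or, if_true, Bool.false_eq_true, if_false]
        rcases hr : fstA q₁ rest (n + 1) with _ | ⟨k, r⟩
        · simp [bMin]
        · have hk := fstA_ge q₁ rest (n + 1) k r hr
          simp [bMin, show n < k from by omega]
      · have h1' : q₁ p = false := by simp [h1]
        have h2' : q₂ p = false := by simp [h2]
        simp [fstA, h1', h2', ih (n + 1)]

lemma bMin_assoc (a b c : Option (Nat × String)) :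
    bMin (bMin a b) c = bMin a (bMin b c) := by
  rcases a with _ | a <;> rcases b with _ | b <;> rcases c with _ | c <;>
    simp only [bMin] <;>
    (try split_ifs) <;> (try simp only [bMin]) <;> (try split_ifs) <;> first | rfl | omega

lemma foldl_bMin (f : String → Option (Nat × String)) :
    ∀ (cs : List String) (a : Option (Nat × String)),
      cs.foldl (fun acc c => bMin acc (f c)) a
        = bMin a (cs.foldl (fun acc c => bMin acc (f c)) none) := by
  intro cs
  induction cs with
  | nil => intro a; cases a <;> rfl
  | cons c cs ih =>
      intro a
      simp only [List.foldl_cons]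
      rw [ih (bMin a (f c)), ih (bMin none (f c)), bMin_assoc]
      rfl

lemma bFold_eq_fstA :
    ∀ (cs : List String),
      cs.foldl (fun acc c => bMin acc (bFirstKw (PySem.Str.lower c) roomPriority 0)) none
        = fstA (fun p => cs.any (fun c => kwMatch c p)) roomPriority 0 := by
  intro cs
  induction cs with
  | nil =>
      rw [fstA_congr _ (fun _ => false) (by simp) roomPriority 0, fstA_false]
      rfl
  | cons c cs ih =>
      simp only [List.foldl_cons]
      rw [foldl_bMin, ih, bFirstKw_eq_fstA]
      show bMin (bMin none (fstA (kwMatch c) roomPriority 0)) _ = _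
      rw [show bMin none (fstA (kwMatch c) roomPriority 0)
            = fstA (kwMatch c) roomPriority 0 from rfl,
          ← fstA_or]
      exact fstA_congr _ _ (by intro p; simp) roomPriority 0

-- ===== VERDICT (by name: the statement is the Claim_ definition above) =====
theorem categorize_room_by_contents_spec : Claim_equal_categorize_room_by_contents := by
  intro cs _
  unfold Spec_categorize_room_by_contents categorize_room_by_contents categorize_room_by_contents_alt
  rw [aLoop_eq_fstA cs roomPriority 0, bFold_eq_fstA cs]
  rcases fstA (fun p => cs.any (fun c => kwMatch c p)) roomPriority 0 with _ | ⟨k, r⟩ <;> rfl
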